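-- pv_equiv track=rewrite | github.com/vsbpro/python | ct.py | getrange
-- ===== SOURCE A (Python) =====
-- def getrange(raneAttribute):
--     attributes = [];
--     s = 0
--     e = 0
--     i = 0
--     for c in raneAttribute:
--         if c == "(":
--             s = i + 1
--         elif c == ")":
--             e = i
--             v = raneAttribute[s:e]
--             attributes.append(v.split(","))
--         i += 1
--     return attributes
-- ===== SOURCE B (Python) =====
-- def getrange(raneAttribute):
--     attributes = []
--     for e, c in enumerate(raneAttribute):
--         if c == ")":
--             s = raneAttribute.rfind("(", 0, e) + 1
--             attributes.append(raneAttribute[s:e].split(","))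
--     return attributes
-- ===== Notes on version B (the rewrite author's own statement) =====
-- stated objective: alternative
-- what changed: Replaces A's single forward pass that carries a running last-open-parenthesis state variable with a per-closing-parenthesis rfind scan that recomputes the nearest preceding opening parenthesis on the prefix.
import Mathlib
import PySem

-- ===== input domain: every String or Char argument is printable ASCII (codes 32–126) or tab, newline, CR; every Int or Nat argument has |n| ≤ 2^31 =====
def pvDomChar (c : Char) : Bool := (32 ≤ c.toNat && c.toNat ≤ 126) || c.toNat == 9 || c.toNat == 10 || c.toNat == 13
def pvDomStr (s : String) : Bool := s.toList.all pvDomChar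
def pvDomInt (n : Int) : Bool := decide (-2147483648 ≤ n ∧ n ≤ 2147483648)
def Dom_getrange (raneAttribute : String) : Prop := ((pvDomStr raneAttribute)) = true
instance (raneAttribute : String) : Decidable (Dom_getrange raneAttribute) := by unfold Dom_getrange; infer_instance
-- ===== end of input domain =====

-- B replaces A's running last-open-parenthesis state variable with a per-closing-parenthesis rfind scan on the prefix; alternative decomposition, same results.

-- ===== PORT A =====
-- state: (s, e, i, attributes), exactly A's variables
def getrangeStepA (cs : List Char) (st : Int × Int × Int × List (List String)) (c : Char) :
    Int × Int × Int × List (List String) :=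
  let (s, e, i, acc) := st
  if c = '(' then (i + 1, e, i + 1, acc)
  else if c = ')' then
    let v := PySem.Chars.slice cs (some s) (some i)
    (s, i, i + 1, acc ++ [(PySem.Chars.splitOn v [',']).map String.ofList])
  else (s, e, i + 1, acc)

def getrange (raneAttribute : String) : List (List String) :=
  let cs := raneAttribute.toList
  (cs.foldl (getrangeStepA cs) (0, 0, 0, [])).2.2.2

-- ===== PORT B =====
def getrangeStepB (cs : List Char) (acc : List (List String)) (p : Int × Char) :
    List (List String) :=
  if p.2 = ')' then
    acc ++ [(PySem.Chars.splitOn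
      (PySem.Chars.slice cs (some (PySem.Chars.rfindFrom cs ['('] 0 (some p.1) + 1)) (some p.1))
      [',']).map String.ofList]
  else acc

def getrange_alt (raneAttribute : String) : List (List String) :=
  let cs := raneAttribute.toList
  (PySem.List.enumerate cs 0).foldl (getrangeStepB cs) []

-- ===== PRECONDITION & SPEC =====
def Spec_getrange (raneAttribute : String) (out : List (List String)) : Prop := out = getrange_alt raneAttribute
instance (raneAttribute : String) (out : List (List String)) : Decidable (Spec_getrange raneAttribute out) := by unfold Spec_getrange; infer_instance

-- ===== CLAIM (what is proved, stated in full; the proofs are below) =====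
def Claim_equal_getrange : Prop := ∀ (raneAttribute : String), Dom_getrange raneAttribute → Spec_getrange raneAttribute (getrange raneAttribute)

-- ===== LEMMAS AND PROOFS =====

-- single-char prefix test ignores a snoc'd element when the list is nonempty
theorem pvPrefixSnoc (a c : Char) (xs : List Char) (h : xs ≠ []) :
    List.isPrefixOf [a] (xs ++ [c]) = List.isPrefixOf [a] xs := by
  cases xs with
  | nil => exact absurd rfl h
  | cons x t => simp [List.isPrefixOf]

-- rfind.go on a snoc, below the new index, is unchanged
theorem pvGoSnoc (ps : List Char) (c a : Char) : ∀ (x : Nat), x < ps.length →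
    PySem.Chars.rfind.go (ps ++ [c]) [a] x = PySem.Chars.rfind.go ps [a] x := by
  intro x
  induction x with
  | zero =>
    intro hx
    rw [PySem.Chars.rfind.go.eq_1, PySem.Chars.rfind.go.eq_1]
    rw [pvPrefixSnoc a c ps (by intro h; simp [h] at hx)]
  | succ j ih =>
    intro hx
    rw [PySem.Chars.rfind.go.eq_2, PySem.Chars.rfind.go.eq_2]
    have hdrop : (ps ++ [c]).drop (j + 1) = ps.drop (j + 1) ++ [c] :=
      List.drop_append_of_le_length (by omega)
    rw [hdrop, pvPrefixSnoc a c (ps.drop (j + 1)) (by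
      intro h
      have := congrArg List.length h
      simp at this
      omega)]
    rw [ih (by omega)]

-- rfind of a single char on a snoc
theorem pvRfindSnoc (ps : List Char) (c a : Char) :
    PySem.Chars.rfind (ps ++ [c]) [a] =
      if c = a then (ps.length : Int) else PySem.Chars.rfind ps [a] := by
  unfold PySem.Chars.rfind
  have hlen : (ps ++ [c]).length = ps.length + 1 := by simp
  rw [hlen, PySem.Chars.rfind.go.eq_2]
  have hd1 : (ps ++ [c]).drop (ps.length + 1) = [] := by simp
  rw [hd1]
  simp only [List.isPrefixOf, Bool.false_eq_true, if_false]
  cases ps with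
  | nil =>
    simp only [List.length_nil, List.nil_append]
    rw [PySem.Chars.rfind.go.eq_1, PySem.Chars.rfind.go.eq_1]
    have h5 : [a].isPrefixOf [c] = (a == c) := by simp [List.isPrefixOf]
    have h6 : [a].isPrefixOf ([] : List Char) = false := rfl
    rw [h5, h6]
    by_cases hca : c = a
    · simp [hca]
    · simp [hca, Ne.symm hca]
  | cons x t =>
    rw [show (x :: t).length = t.length + 1 from by simp, PySem.Chars.rfind.go.eq_2]
    have hd2 : ((x :: t) ++ [c]).drop (t.length + 1) = [c] := by
      simpa using List.drop_append_of_le_length (l₁ := x :: t) (l₂ := [c]) (by simp : t.length + 1 ≤ (x :: t).length)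
    rw [hd2]
    by_cases hca : c = a
    · subst hca
      have h5 : [c].isPrefixOf [c] = true := by simp
      rw [h5]
      simp
    · have hpf : List.isPrefixOf [a] [c] = false := by
        simp [List.isPrefixOf, Ne.symm hca]
      rw [hpf]
      simp only [Bool.false_eq_true, if_false, if_neg hca]
      rw [PySem.Chars.rfind.go.eq_2 (x :: t)]
      have hd3 : (x :: t).drop (t.length + 1) = [] := by simp
      rw [hd3]
      simp only [List.isPrefixOf, Bool.false_eq_true, if_false]
      exact pvGoSnoc (x :: t) c a t.length (by simp)

theorem pvRfindFromZero (full : List Char) (L : Nat) (hL : L ≤ full.length) :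
    PySem.Chars.rfindFrom full ['('] 0 (some (L : Int)) + 1 =
      PySem.Chars.rfind (full.take L) ['('] + 1 := by
  unfold PySem.Chars.rfindFrom
  have h1 : ¬ ((full.length : Int) < (L : Int)) := by omega
  have h2 : ¬ ((L : Int) < 0) := by omega
  have h3 : ¬ ((0 : Int) < 0) := by omega
  simp only [if_neg h1, if_neg h2, if_neg h3, Int.toNat_natCast, Int.toNat_zero,
    List.drop_zero, zero_add]
  by_cases hr : PySem.Chars.rfind (full.take L) ['('] = -1
  · simp [hr]
  · simp [hr]

-- main invariant: the state after folding A's step over a prefix ps of full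
theorem pvMain (full : List Char) (ps : List Char) (hps : ps <+: full) :
    (ps.foldl (getrangeStepA full) (0, 0, 0, [])).1 = PySem.Chars.rfind ps ['('] + 1 ∧
    (ps.foldl (getrangeStepA full) (0, 0, 0, [])).2.2.1 = (ps.length : Int) ∧
    (ps.foldl (getrangeStepA full) (0, 0, 0, [])).2.2.2 =
      (PySem.List.enumerate ps 0).foldl (getrangeStepB full) [] := by
  induction ps using List.reverseRecOn with
  | nil =>
    refine ⟨?_, by simp, by simp [PySem.List.enumerate]⟩
    show (0 : Int) = PySem.Chars.rfind [] ['('] + 1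
    decide
  | append_singleton ps c ih =>
    have hps' : ps <+: full := (List.prefix_append ps [c]).trans hps
    obtain ⟨h1, h2, h3⟩ := ih hps'
    have hLle : ps.length + 1 ≤ full.length := by
      have := hps.length_le; simpa using this
    have htake : full.take ps.length = ps := (List.prefix_iff_eq_take.mp hps').symm
    have henum : PySem.List.enumerate (ps ++ [c]) 0 =
        PySem.List.enumerate ps 0 ++ [((ps.length : Int), c)] := by
      rw [PySem.List.enumerate_append]
      simp [PySem.List.enumerate_cons, PySem.List.enumerate_nil]
    rw [List.foldl_append, henum, List.foldl_append]
    rw [pvRfindSnoc]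
    set st := ps.foldl (getrangeStepA full) (0, 0, 0, []) with hst
    obtain ⟨s, e, i, acc⟩ := st
    simp only at h1 h2 h3
    subst h1 h2 h3
    simp only [List.foldl_cons, List.foldl_nil]
    by_cases hco : c = '('
    · subst hco
      refine ⟨?_, ?_, ?_⟩ <;>
        simp [getrangeStepA, getrangeStepB]
    · by_cases hcc : c = ')'
      · subst hcc
        have hrw : PySem.Chars.rfindFrom full ['('] 0 (some ((ps.length : Int))) + 1 =
            PySem.Chars.rfind ps ['('] + 1 := by
          rw [pvRfindFromZero full ps.length (by omega), htake]
        refine ⟨by simp [getrangeStepA], by simp [getrangeStepA], ?_⟩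
        simp only [getrangeStepA, getrangeStepB]
        simp [hrw]
      · refine ⟨?_, ?_, ?_⟩
        · simp [getrangeStepA, hco, hcc]
        · simp [getrangeStepA, hco, hcc]
        · simp [getrangeStepA, getrangeStepB, hco, hcc]

-- ===== VERDICT (by name: the statement is the Claim_ definition above) =====
theorem getrange_spec : Claim_equal_getrange := by
  intro r _
  unfold Spec_getrange getrange getrange_alt
  exact (pvMain r.toList r.toList List.prefix_rfl).2.2
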